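-- pv_equiv track=rewrite | github.com/dominhtri055/Personal-Information-Bot | Bot/Bot.py | extract_affiliation
-- ===== SOURCE A (Python) =====
-- from typing import List, Optional
--
-- AFFILIATION_HINTS = [
--     "University", "College", "Institute", "School of", "Department of",
--     "Laboratory", "Lab", "Center", "Centre", "Hospital", "Company", "Inc."
-- ]
--
-- def extract_affiliation(text: str) -> Optional[str]:
--     lines = text.splitlines()
--     candidates = []
--
--     for line in lines[:350]:
--         if len(line) > 220:
--             continue
--         if any(hint.lower() in line.lower() for hint in AFFILIATION_HINTS):
--             candidates.append(line)
--
--     if not candidates: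
--         return None
--
--     candidates.sort(key=lambda x: (
--         0 if ("University" in x or "Institute" in x or "College" in x) else 1,
--         len(x)
--     ))
--     return candidates[0][:220]
-- ===== SOURCE B (Python) =====
-- from typing import Optional
--
-- AFFILIATION_HINTS = [
--     "University", "College", "Institute", "School of", "Department of",
--     "Laboratory", "Lab", "Center", "Centre", "Hospital", "Company", "Inc."
-- ]
--
-- def _key(line):
--     return (0 if ("University" in line or "Institute" in line or "College" in line) else 1,
--             len(line))
--
-- def extract_affiliation(text: str) -> Optional[str]:
--     best = None
--     for line in text.splitlines()[:350]:
--         if len(line) > 220: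
--             continue
--         if any(hint.lower() in line.lower() for hint in AFFILIATION_HINTS):
--             if best is None or _key(line) < _key(best):
--                 best = line
--     return None if best is None else best[:220]
-- ===== Notes on version B (the rewrite author's own statement) =====
-- stated objective: simpler
-- what changed: Replaces the build-a-candidate-list-then-stable-sort-and-take-first strategy by a single pass that tracks the best line so far under the same key tuple (strict-improvement update preserves the stable sort's first-minimum tie-break), returning best[:220] or None.
import Mathlib
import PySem

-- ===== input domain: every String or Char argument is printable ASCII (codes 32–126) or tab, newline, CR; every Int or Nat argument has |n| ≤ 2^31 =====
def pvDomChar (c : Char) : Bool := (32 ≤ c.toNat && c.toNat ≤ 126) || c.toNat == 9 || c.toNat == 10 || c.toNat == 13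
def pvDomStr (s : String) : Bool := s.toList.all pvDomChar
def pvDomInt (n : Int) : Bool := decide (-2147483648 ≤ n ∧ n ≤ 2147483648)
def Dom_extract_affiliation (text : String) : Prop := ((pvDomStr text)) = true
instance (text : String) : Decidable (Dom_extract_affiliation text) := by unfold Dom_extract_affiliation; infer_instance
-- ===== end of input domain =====

-- B replaces A's build-candidates-then-stable-sort-and-index selection by a single
-- best-so-far scan under the same key tuple; objective: simpler (one pass, no sort).


-- ===== PORT A =====
-- module constant AFFILIATION_HINTS (shared by both Pythons)
def pyAFFILIATION_HINTS : List String :=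
  ["University", "College", "Institute", "School of", "Department of",
   "Laboratory", "Lab", "Center", "Centre", "Hospital", "Company", "Inc."]

-- 'any(hint.lower() in line.lower() for hint in AFFILIATION_HINTS)' (appears verbatim in A and in B)
def hintMatch (line : String) : Bool :=
  pyAFFILIATION_HINTS.any (fun hint => PySem.Str.isIn (PySem.Str.lower hint) (PySem.Str.lower line))

-- '0 if ("University" in x or "Institute" in x or "College" in x) else 1' (A's sort key / B's _key, first component)
def keyMajor (x : String) : Int :=
  if PySem.Str.isIn "University" x || PySem.Str.isIn "Institute" x || PySem.Str.isIn "College" x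
  then 0 else 1

def extract_affiliation (text : String) : Option String :=
  let lines := PySem.Str.splitlines text
  let candidates := (PySem.List.slice lines none (some 350)).foldl
    (fun acc line =>
      if PySem.Str.len line > 220 then acc
      else if hintMatch line then acc ++ [line] else acc) []
  if candidates = [] then none
  else
    let sortedC := PySem.List.sorted2 candidates keyMajor (fun x => PySem.Str.len x)
    (PySem.List.pyGet? sortedC 0).map (fun c => PySem.Str.slice c none (some 220))

-- ===== PORT B =====
def extract_affiliation_alt (text : String) : Option String :=
  let best := (PySem.List.slice (PySem.Str.splitlines text) none (some 350)).foldl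
    (fun best line =>
      if PySem.Str.len line > 220 then best
      else if hintMatch line then
        match best with
        | none => some line
        | some b =>
          if keyMajor line < keyMajor b ∨
             (keyMajor line = keyMajor b ∧ PySem.Str.len line < PySem.Str.len b)
          then some line else best
      else best) none
  best.map (fun b => PySem.Str.slice b none (some 220))

-- ===== PRECONDITION & SPEC =====
def Spec_extract_affiliation (text : String) (out : Option String) : Prop := out = extract_affiliation_alt text
instance (text : String) (out : Option String) : Decidable (Spec_extract_affiliation text out) := by unfold Spec_extract_affiliation; infer_instance

-- ===== CLAIM (what is proved, stated in full; the proofs are below) =====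
def Claim_equal_extract_affiliation : Prop := ∀ (text : String), Dom_extract_affiliation text → Spec_extract_affiliation text (extract_affiliation text)

-- ===== LEMMAS AND PROOFS =====

-- the filter both loops apply to each line
def keepLine (line : String) : Bool := !decide (PySem.Str.len line > 220) && hintMatch line

-- head of a left fold of insertBy = first-minimum tracking fold (the shape shared by
-- PySem.List.sorted2 and PySem.List.min2?)
theorem head?_foldl_insertBy {α : Type} (lt : α → α → Bool) (xs : List α) (acc : List α) :
    (xs.foldl (fun a x => PySem.List.insertBy lt x a) acc).head? =
    xs.foldl (fun o x => match o with
      | none => some x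
      | some m => if lt x m then some x else some m) acc.head? := by
  induction xs generalizing acc with
  | nil => rfl
  | cons x xs ih =>
    simp only [List.foldl_cons]
    rw [ih]
    congr 1
    cases acc with
    | nil => rfl
    | cons y ys =>
      simp only [PySem.List.insertBy, List.head?_cons]
      split <;> rfl

theorem head?_sorted2 (xs : List String) (k1 k2 : String → Int) :
    (PySem.List.sorted2 xs k1 k2).head? = PySem.List.min2? xs k1 k2 := by
  simp only [PySem.List.sorted2, PySem.List.min2?, if_neg (by decide : ¬ (false = true))]
  exact head?_foldl_insertBy _ xs []

-- A's candidate loop builds exactly the filtered list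
theorem candidates_eq (L : List String) :
    L.foldl (fun acc line =>
      if PySem.Str.len line > 220 then acc
      else if hintMatch line then acc ++ [line] else acc) [] = L.filter keepLine := by
  have h : ∀ (acc : List String), ∀ line ∈ L,
      (if PySem.Str.len line > 220 then acc
       else if hintMatch line then acc ++ [line] else acc) =
      (if keepLine line then acc ++ [line] else acc) := by
    intro acc line _
    by_cases h1 : PySem.Str.len line > 220
    · rw [if_pos h1]
      have hk : keepLine line = false := by
        simp only [keepLine, Bool.and_eq_false_iff, Bool.not_eq_false', decide_eq_true_eq]
        left; exact h1
      rw [hk]; rfl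
    · rw [if_neg h1]
      by_cases h2 : hintMatch line
      · have hk : keepLine line = true := by
          simp only [keepLine, Bool.and_eq_true, Bool.not_eq_true', decide_eq_false_iff_not]
          exact ⟨h1, h2⟩
        rw [if_pos h2, hk]; rfl
      · have hk : keepLine line = false := by
          simp only [keepLine, Bool.and_eq_false_iff]
          right; exact Bool.eq_false_iff.mpr h2
        rw [if_neg h2, hk]; rfl
  rw [PySem.List.foldl_congr_mem L _
        (fun acc line => if keepLine line then acc ++ [line] else acc) [] h,
      PySem.List.foldl_append_if_eq_filter, List.nil_append]

-- B's loop is the min2? fold over the filtered list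
theorem best_eq (L : List String) :
    L.foldl (fun best line =>
      if PySem.Str.len line > 220 then best
      else if hintMatch line then
        match best with
        | none => some line
        | some b =>
          if keyMajor line < keyMajor b ∨
             (keyMajor line = keyMajor b ∧ PySem.Str.len line < PySem.Str.len b)
          then some line else best
      else best) none =
    PySem.List.min2? (L.filter keepLine) keyMajor (fun x => PySem.Str.len x) := by
  simp only [PySem.List.min2?]
  have h : ∀ (best : Option String), ∀ line ∈ L,
      (if PySem.Str.len line > 220 then best
       else if hintMatch line then
         match best with
         | none => some line
         | some b =>
           if keyMajor line < keyMajor b ∨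
              (keyMajor line = keyMajor b ∧ PySem.Str.len line < PySem.Str.len b)
           then some line else best
       else best) =
      (if keepLine line then
         (match best with
          | none => some line
          | some m =>
            if (decide (keyMajor line < keyMajor m) ||
                (!decide (keyMajor m < keyMajor line) &&
                 decide (PySem.Str.len line < PySem.Str.len m))) = true
            then some line else some m)
       else best) := by
    intro best line _
    by_cases h1 : PySem.Str.len line > 220
    · have hk : keepLine line = false := by
        simp only [keepLine, Bool.and_eq_false_iff, Bool.not_eq_false', decide_eq_true_eq]
        left; exact h1
      rw [if_pos h1, hk]; rfl
    · rw [if_neg h1]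
      by_cases h2 : hintMatch line
      · have hk : keepLine line = true := by
          simp only [keepLine, Bool.and_eq_true, Bool.not_eq_true', decide_eq_false_iff_not]
          exact ⟨h1, h2⟩
        rw [if_pos h2, hk, if_pos rfl]
        cases best with
        | none => rfl
        | some m =>
          dsimp only
          have heq : (keyMajor line < keyMajor m ∨
                  (keyMajor line = keyMajor m ∧ PySem.Str.len line < PySem.Str.len m)) ↔
                 (decide (keyMajor line < keyMajor m) ||
                  (!decide (keyMajor m < keyMajor line) &&
                   decide (PySem.Str.len line < PySem.Str.len m))) = true := by
            simp only [Bool.or_eq_true, Bool.and_eq_true, Bool.not_eq_true',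
              decide_eq_true_eq, decide_eq_false_iff_not]
            omega
          by_cases hlt : keyMajor line < keyMajor m ∨
              (keyMajor line = keyMajor m ∧ PySem.Str.len line < PySem.Str.len m)
          · rw [if_pos hlt, if_pos (heq.mp hlt)]
          · rw [if_neg hlt, if_neg (fun hb => hlt (heq.mpr hb))]
      · have hk : keepLine line = false := by
          simp only [keepLine, Bool.and_eq_false_iff]
          right; exact Bool.eq_false_iff.mpr h2
        rw [if_neg h2, hk]; rfl
  rw [PySem.List.foldl_congr_mem L _
        (fun (acc : Option String) line =>
          if keepLine line then
            (match acc with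
             | none => some line
             | some m =>
               if (decide (keyMajor line < keyMajor m) ||
                   (!decide (keyMajor m < keyMajor line) &&
                    decide (PySem.Str.len line < PySem.Str.len m))) = true
               then some line else some m)
          else acc) none h,
      PySem.List.foldl_if_eq_foldl_filter]
  exact PySem.List.foldl_congr_mem _ _ _ _ (fun acc x _ => by cases acc <;> rfl)

-- ===== VERDICT (by name: the statement is the Claim_ definition above) =====
theorem extract_affiliation_spec : Claim_equal_extract_affiliation := by
  intro text _
  unfold Spec_extract_affiliation extract_affiliation extract_affiliation_alt
  simp only [candidates_eq, best_eq]
  set F := (PySem.List.slice (PySem.Str.splitlines text) none (some 350)).filter keepLine with hF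
  by_cases hnil : F = []
  · simp [hnil, PySem.List.min2?]
  · rw [if_neg hnil]
    have : PySem.List.pyGet? (PySem.List.sorted2 F keyMajor (fun x => PySem.Str.len x)) 0 =
        (PySem.List.sorted2 F keyMajor (fun x => PySem.Str.len x)).head? := by
      rw [PySem.List.pyGet?_zero]
      cases PySem.List.sorted2 F keyMajor (fun x => PySem.Str.len x) <;> rfl
    rw [this, head?_sorted2]
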